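-- pv_equiv track=rewrite | github.com/ByPro8/METABot-Tester | tools/tchk/banks/vakifbank/ios_engine.py | _strip_exiftool_headers
-- ===== SOURCE A (Python) =====
-- def _strip_exiftool_headers(raw: str) -> str:
--     if not raw:
--         return ""
--     lines = raw.splitlines(True)
--     out: list[str] = []
--     i = 0
--     while i < len(lines):
--         if lines[i].strip() == "---- ExifTool ----":
--             j = i + 1
--             while j < len(lines) and lines[j].strip() == "":
--                 j += 1
--             if j < len(lines):
--                 nxt = lines[j].lstrip()
--                 if nxt.startswith("ExifTool Version") or nxt.startswith("ExifToolVersion"):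
--                     k = j + 1
--                     while k < len(lines) and lines[k].strip() != "":
--                         k += 1
--                     while k < len(lines) and lines[k].strip() == "":
--                         k += 1
--                     i = k
--                     continue
--         out.append(lines[i])
--         i += 1
--     return "".join(out).lstrip("\n")
-- ===== SOURCE B (Python) =====
-- def _strip_exiftool_headers(raw: str) -> str:
--     # Single forward pass with a 4-state machine (buffering after a marker)
--     # instead of A's index scanner with nested lookahead loops.
--     MARKER = "---- ExifTool ----"
--     out: list[str] = []
--     buf: list[str] = []
--     state = 0  # 0 normal, 1 after marker (buffering blanks), 2 block body, 3 trailing blanks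
--     for line in raw.splitlines(True):
--         while True:
--             if state == 0:
--                 if line.strip() == MARKER:
--                     state, buf = 1, [line]
--                 else:
--                     out.append(line)
--                 break
--             if state == 1:
--                 if line.strip() == "":
--                     buf.append(line)
--                     break
--                 ls = line.lstrip()
--                 if ls.startswith("ExifTool Version") or ls.startswith("ExifToolVersion"):
--                     state, buf = 2, []
--                     break
--                 out.extend(buf)
--                 state, buf = 0, []
--                 continue  # reprocess this line as normal text
--             if state == 2:
--                 if line.strip() == "":
--                     state = 3
--                 break
--             # state == 3
--             if line.strip() == "":
--                 break
--             state = 0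
--             continue  # reprocess this line as normal text
--     if state == 1:
--         out.extend(buf)
--     return "".join(out).lstrip("\n")
-- ===== Notes on version B (the rewrite author's own statement) =====
-- stated objective: alternative
-- what changed: Replaced A's index-based scanner with nested lookahead while-loops by a single forward pass over the lines driven by a 4-state machine that buffers a candidate marker and its following blank lines.
import Mathlib
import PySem

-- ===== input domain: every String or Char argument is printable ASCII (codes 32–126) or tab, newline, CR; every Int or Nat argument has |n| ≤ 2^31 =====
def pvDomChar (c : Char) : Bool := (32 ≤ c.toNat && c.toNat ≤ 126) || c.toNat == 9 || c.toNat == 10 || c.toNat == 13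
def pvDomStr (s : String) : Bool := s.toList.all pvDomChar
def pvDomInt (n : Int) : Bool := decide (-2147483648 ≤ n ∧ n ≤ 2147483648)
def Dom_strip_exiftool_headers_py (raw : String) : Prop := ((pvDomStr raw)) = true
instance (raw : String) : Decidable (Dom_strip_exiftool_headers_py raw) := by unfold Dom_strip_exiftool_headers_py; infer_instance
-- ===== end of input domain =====

-- B replaces A's index scanner (nested lookahead while-loops) by a single forward
-- pass with a 4-state machine buffering a candidate marker block (alternative, same cost).

-- shared primitive port: Python raw.splitlines(True) (keepends). Exact for the line
-- breaks possible on the domain (\n, \r, \r\n); `acc` holds the current line reversed.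
def pvSplitKeepGo (acc : List Char) : List Char → List (List Char)
  | [] => if acc.isEmpty then [] else [acc.reverse]
  | '\r' :: '\n' :: t => (acc.reverse ++ ['\r', '\n']) :: pvSplitKeepGo [] t
  | '\r' :: t => (acc.reverse ++ ['\r']) :: pvSplitKeepGo [] t
  | '\n' :: t => (acc.reverse ++ ['\n']) :: pvSplitKeepGo [] t
  | c :: t => pvSplitKeepGo (c :: acc) t

def pvSplitKeep (cs : List Char) : List (List Char) := pvSplitKeepGo [] cs

-- shared line predicates (line.strip() == "", line.strip() == marker, version prefix test)
def pvIsBlank (l : List Char) : Bool := PySem.Chars.strip l == []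
def pvIsMarker (l : List Char) : Bool := PySem.Chars.strip l == "---- ExifTool ----".toList
def pvIsVersion (l : List Char) : Bool :=
  PySem.Chars.startswith (PySem.Chars.lstrip l) "ExifTool Version".toList ||
  PySem.Chars.startswith (PySem.Chars.lstrip l) "ExifToolVersion".toList

-- shared primitive port: Python s.lstrip("\n") — exact: drop leading '\n' only
def pvLstripNl (cs : List Char) : List Char := cs.dropWhile (· == '\n')

-- ===== PORT A =====
-- A's outer while-i loop as recursion on the suffix of lines; the inner while-j /
-- while-k "skip blanks / skip non-blanks" loops are the dropWhile/takeWhile skips.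
def pvALoop : List (List Char) → List (List Char)
  | [] => []
  | l :: rest =>
    if pvIsMarker l then
      match h : rest.dropWhile pvIsBlank with
      | [] => l :: pvALoop rest
      | v :: body =>
        if pvIsVersion v then
          pvALoop ((body.dropWhile (fun x => !pvIsBlank x)).dropWhile pvIsBlank)
        else
          l :: pvALoop rest
    else
      l :: pvALoop rest
termination_by lines => lines.length
decreasing_by
  · simp only [List.length_cons]; omega
  · have h1 : (rest.dropWhile pvIsBlank).length ≤ rest.length := rest.length_dropWhile_le _
    rw [h] at h1
    have h2 := (body.dropWhile (fun x => !pvIsBlank x)).length_dropWhile_le pvIsBlank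
    have h3 := body.length_dropWhile_le (fun x => !pvIsBlank x)
    simp only [List.length_cons] at h1 ⊢; omega
  · simp only [List.length_cons]; omega
  · simp only [List.length_cons]; omega

def strip_exiftool_headers_py (raw : String) : String :=
  if raw.toList.isEmpty then ""
  else String.ofList (pvLstripNl (PySem.Chars.join [] (pvALoop (pvSplitKeep raw.toList))))

-- ===== PORT B =====
-- B's state machine: state 0 normal, 1 after marker (buffering blanks), 2 block body,
-- 3 trailing blanks; step state = (state, buf, out).
def pvStep0 (out : List (List Char)) (l : List Char) :
    Nat × List (List Char) × List (List Char) :=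
  if pvIsMarker l then (1, [l], out) else (0, [], out ++ [l])

def pvStep (s : Nat × List (List Char) × List (List Char)) (l : List Char) :
    Nat × List (List Char) × List (List Char) :=
  match s with
  | (0, _, out) => pvStep0 out l
  | (1, buf, out) =>
    if pvIsBlank l then (1, buf ++ [l], out)
    else if pvIsVersion l then (2, [], out)
    else pvStep0 (out ++ buf) l
  | (2, _, out) => if pvIsBlank l then (3, [], out) else (2, [], out)
  | (_, _, out) => if pvIsBlank l then (3, [], out) else pvStep0 out l

def pvFinalize (s : Nat × List (List Char) × List (List Char)) : List (List Char) :=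
  match s with
  | (1, buf, out) => out ++ buf
  | (_, _, out) => out

def pvBLoop (lines : List (List Char)) : List (List Char) :=
  pvFinalize (lines.foldl pvStep (0, [], []))

def strip_exiftool_headers_py_alt (raw : String) : String :=
  String.ofList (pvLstripNl (PySem.Chars.join [] (pvBLoop (pvSplitKeep raw.toList))))

-- ===== PRECONDITION & SPEC =====
def Spec_strip_exiftool_headers_py (raw : String) (out : String) : Prop := out = strip_exiftool_headers_py_alt raw
instance (raw : String) (out : String) : Decidable (Spec_strip_exiftool_headers_py raw out) := by unfold Spec_strip_exiftool_headers_py; infer_instance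

-- ===== CLAIM (what is proved, stated in full; the proofs are below) =====
def Claim_equal_strip_exiftool_headers_py : Prop := ∀ (raw : String), Dom_strip_exiftool_headers_py raw → Spec_strip_exiftool_headers_py raw (strip_exiftool_headers_py raw)

-- ===== LEMMAS AND PROOFS =====

-- a blank line is never the marker line (its strip is empty, the marker's is not)
theorem pv_blank_not_marker (l : List Char) (h : pvIsBlank l = true) : pvIsMarker l = false := by
  simp only [pvIsBlank, beq_iff_eq] at h
  simp [pvIsMarker, h]

-- the head of a dropWhile result falsifies the predicate
theorem pv_dropWhile_head {α : Type} (p : α → Bool) :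
    ∀ (l : List α) (v : α) (body : List α), l.dropWhile p = v :: body → p v = false := by
  intro l
  induction l with
  | nil => intro v body h; simp at h
  | cons a t ih =>
    intro v body h
    by_cases hp : p a = true
    · rw [List.dropWhile_cons_of_pos hp] at h; exact ih v body h
    · rw [List.dropWhile_cons_of_neg hp] at h
      cases h; simpa using hp

-- pvALoop unfolding lemmas
theorem pvALoop_nil : pvALoop [] = [] := by
  rw [pvALoop.eq_def]

theorem pvALoop_cons_not_marker (l : List Char) (rest : List (List Char))
    (h : pvIsMarker l = false) : pvALoop (l :: rest) = l :: pvALoop rest := by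
  rw [pvALoop.eq_def]; simp [h]

theorem pvALoop_marker_nil (l : List Char) (rest : List (List Char))
    (hm : pvIsMarker l = true) (h : rest.dropWhile pvIsBlank = []) :
    pvALoop (l :: rest) = l :: pvALoop rest := by
  rw [pvALoop.eq_def]
  simp only [hm, if_true]
  split
  · rfl
  · rename_i v body hcons; simp [h] at hcons

theorem pvALoop_marker_version (l v : List Char) (rest body : List (List Char))
    (hm : pvIsMarker l = true) (h : rest.dropWhile pvIsBlank = v :: body)
    (hv : pvIsVersion v = true) :
    pvALoop (l :: rest) =
      pvALoop ((body.dropWhile (fun x => !pvIsBlank x)).dropWhile pvIsBlank) := by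
  rw [pvALoop.eq_def]
  simp only [hm, if_true]
  split
  · rename_i hnil; simp [h] at hnil
  · rename_i v' body' hcons
    rw [h] at hcons
    injection hcons with h1 h2
    subst h1; subst h2
    simp [hv]

theorem pvALoop_marker_noversion (l v : List Char) (rest body : List (List Char))
    (hm : pvIsMarker l = true) (h : rest.dropWhile pvIsBlank = v :: body)
    (hv : pvIsVersion v = false) :
    pvALoop (l :: rest) = l :: pvALoop rest := by
  rw [pvALoop.eq_def]
  simp only [hm, if_true]
  split
  · rename_i hnil; simp [h] at hnil
  · rename_i v' body' hcons
    rw [h] at hcons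
    injection hcons with h1 h2
    subst h1; subst h2
    simp [hv]

-- A keeps blank lines verbatim (a blank line is never a marker)
theorem pvALoop_blanks (bs : List (List Char)) (hb : ∀ b ∈ bs, pvIsBlank b = true) :
    ∀ xs, pvALoop (bs ++ xs) = bs ++ pvALoop xs := by
  induction bs with
  | nil => simp
  | cons b t ih =>
    intro xs
    have hbb := hb b (by simp)
    rw [List.cons_append, pvALoop_cons_not_marker _ _ (pv_blank_not_marker b hbb),
      ih (fun x hx => hb x (by simp [hx])) xs]
    simp

-- pvFinalize on literal states
theorem pvFinalize_one (buf out : List (List Char)) : pvFinalize (1, buf, out) = out ++ buf := rfl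
theorem pvFinalize_two (buf out : List (List Char)) : pvFinalize (2, buf, out) = out := rfl
theorem pvFinalize_three (buf out : List (List Char)) : pvFinalize (3, buf, out) = out := rfl

-- machine segment lemmas
theorem pvB_state1_blanks (bs : List (List Char)) (hb : ∀ b ∈ bs, pvIsBlank b = true) :
    ∀ (buf out xs : List (List Char)),
      List.foldl pvStep (1, buf, out) (bs ++ xs) = List.foldl pvStep (1, buf ++ bs, out) xs := by
  induction bs with
  | nil => simp
  | cons b t ih =>
    intro buf out xs
    have hbb := hb b (by simp)
    have hstep : pvStep (1, buf, out) b = (1, buf ++ [b], out) := by simp [pvStep, hbb]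
    rw [List.cons_append, List.foldl_cons, hstep, ih (fun x hx => hb x (by simp [hx]))]
    simp

theorem pvB_state2_nonblanks (ns : List (List Char)) (hn : ∀ x ∈ ns, pvIsBlank x = false) :
    ∀ (out xs : List (List Char)),
      List.foldl pvStep (2, [], out) (ns ++ xs) = List.foldl pvStep (2, [], out) xs := by
  induction ns with
  | nil => simp
  | cons a t ih =>
    intro out xs
    have ha := hn a (by simp)
    have hstep : pvStep (2, [], out) a = (2, [], out) := by simp [pvStep, ha]
    rw [List.cons_append, List.foldl_cons, hstep, ih (fun x hx => hn x (by simp [hx]))]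

theorem pvB_state3_blanks (bs : List (List Char)) (hb : ∀ b ∈ bs, pvIsBlank b = true) :
    ∀ (out xs : List (List Char)),
      List.foldl pvStep (3, [], out) (bs ++ xs) = List.foldl pvStep (3, [], out) xs := by
  induction bs with
  | nil => simp
  | cons b t ih =>
    intro out xs
    have hbb := hb b (by simp)
    have hstep : pvStep (3, [], out) b = (3, [], out) := by simp [pvStep, hbb]
    rw [List.cons_append, List.foldl_cons, hstep, ih (fun x hx => hb x (by simp [hx]))]

-- main invariant: the machine started in state 0 produces exactly A's scanner output
theorem pv_main_n : ∀ (n : Nat) (lines : List (List Char)), lines.length ≤ n →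
    ∀ (out : List (List Char)),
      pvFinalize (List.foldl pvStep (0, [], out) lines) = out ++ pvALoop lines := by
  intro n
  induction n with
  | zero =>
    intro lines hn out
    have : lines = [] := List.eq_nil_of_length_eq_zero (Nat.le_zero.mp hn)
    subst this; simp [pvFinalize, pvALoop_nil]
  | succ n ih =>
    intro lines hn out
    cases lines with
    | nil => simp [pvFinalize, pvALoop_nil]
    | cons l rest =>
      have hrest : rest.length ≤ n := by simp only [List.length_cons] at hn; omega
      by_cases hm : pvIsMarker l = true
      · -- marker: machine enters state 1 with buf = [l]
        have hstep : pvStep (0, [], out) l = (1, [l], out) := by simp [pvStep, pvStep0, hm]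
        rw [List.foldl_cons, hstep]
        have hsplit : rest.takeWhile pvIsBlank ++ rest.dropWhile pvIsBlank = rest :=
          List.takeWhile_append_dropWhile
        have hbs : ∀ b ∈ rest.takeWhile pvIsBlank, pvIsBlank b = true :=
          fun b hb => List.mem_takeWhile_imp hb
        conv_lhs => rw [← hsplit]
        rw [pvB_state1_blanks _ hbs]
        cases h2 : rest.dropWhile pvIsBlank with
        | nil =>
          -- no non-blank line after the marker: block kept
          have hsplit' : rest.takeWhile pvIsBlank = rest := by
            rw [h2] at hsplit; simpa using hsplit
          rw [List.foldl_nil, pvFinalize_one, pvALoop_marker_nil l rest hm h2]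
          have hall : ∀ b ∈ rest, pvIsBlank b = true := by
            rw [← hsplit']; exact hbs
          have hrw : pvALoop rest = rest := by
            have := pvALoop_blanks rest hall []
            simpa [pvALoop_nil] using this
          rw [hrw, hsplit']
          simp
        | cons v body =>
          have hvnb : pvIsBlank v = false := pv_dropWhile_head _ rest v body h2
          by_cases hv : pvIsVersion v = true
          · -- version line found: whole block dropped
            have hstep2 : pvStep (1, [l] ++ rest.takeWhile pvIsBlank, out) v = (2, [], out) := by
              simp [pvStep, hvnb, hv]
            rw [List.foldl_cons, hstep2]
            rw [pvALoop_marker_version l v rest body hm h2 hv]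
            have hbody : (body.takeWhile fun x => !pvIsBlank x) ++
                (body.dropWhile fun x => !pvIsBlank x) = body := List.takeWhile_append_dropWhile
            have hns : ∀ x ∈ body.takeWhile (fun x => !pvIsBlank x), pvIsBlank x = false := by
              intro x hx
              have := List.mem_takeWhile_imp hx
              simpa using this
            conv_lhs => rw [← hbody]
            rw [pvB_state2_nonblanks _ hns]
            cases h3 : body.dropWhile (fun x => !pvIsBlank x) with
            | nil =>
              rw [List.foldl_nil, pvFinalize_two]
              simp [pvALoop_nil]
            | cons b rest4 =>
              have hbb : pvIsBlank b = true := by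
                have := pv_dropWhile_head _ body b rest4 h3
                simpa using this
              have hstep3 : pvStep (2, [], out) b = (3, [], out) := by simp [pvStep, hbb]
              rw [List.foldl_cons, hstep3]
              have hdrop : (b :: rest4).dropWhile pvIsBlank = rest4.dropWhile pvIsBlank :=
                List.dropWhile_cons_of_pos hbb
              rw [hdrop]
              have hsplit4 : rest4.takeWhile pvIsBlank ++ rest4.dropWhile pvIsBlank = rest4 :=
                List.takeWhile_append_dropWhile
              have hbs4 : ∀ x ∈ rest4.takeWhile pvIsBlank, pvIsBlank x = true :=
                fun x hx => List.mem_takeWhile_imp hx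
              conv_lhs => rw [← hsplit4]
              rw [pvB_state3_blanks _ hbs4]
              cases h5 : rest4.dropWhile pvIsBlank with
              | nil =>
                rw [List.foldl_nil, pvFinalize_three]
                simp [pvALoop_nil]
              | cons x t =>
                have hx : pvIsBlank x = false := pv_dropWhile_head _ rest4 x t h5
                have hstep4 : pvStep (3, [], out) x = pvStep (0, [], out) x := by
                  simp [pvStep, pvStep0, hx]
                rw [List.foldl_cons, hstep4, ← List.foldl_cons]
                have hlen : (x :: t).length ≤ n := by
                  have e1 : (x :: t).length ≤ rest4.length := by
                    rw [← h5]; exact List.length_dropWhile_le _ _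
                  have e2 : (b :: rest4).length ≤ body.length := by
                    rw [← h3]; exact List.length_dropWhile_le _ _
                  have e3 : (v :: body).length ≤ rest.length := by
                    rw [← h2]; exact List.length_dropWhile_le _ _
                  simp only [List.length_cons] at e1 e2 e3 ⊢
                  omega
                rw [ih (x :: t) hlen out]
          · -- first non-blank line is not a version line: block kept, rescan from it
            have hv' : pvIsVersion v = false := by simpa using hv
            have hstep2 : pvStep (1, [l] ++ rest.takeWhile pvIsBlank, out) v =
                pvStep (0, [], out ++ ([l] ++ rest.takeWhile pvIsBlank)) v := by
              simp [pvStep, pvStep0, hvnb, hv']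
            rw [List.foldl_cons, hstep2, ← List.foldl_cons]
            have hlen : (v :: body).length ≤ n := by
              have e : (v :: body).length ≤ rest.length := by
                rw [← h2]; exact List.length_dropWhile_le _ _
              simp only [List.length_cons] at e ⊢
              omega
            rw [ih (v :: body) hlen]
            rw [pvALoop_marker_noversion l v rest body hm h2 hv']
            have hrw : pvALoop rest = rest.takeWhile pvIsBlank ++ pvALoop (v :: body) := by
              conv_lhs => rw [← hsplit, h2]
              exact pvALoop_blanks _ hbs (v :: body)
            rw [hrw]
            simp
      · -- ordinary line: copied through
        have hm' : pvIsMarker l = false := by simpa using hm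
        have hstep : pvStep (0, [], out) l = (0, [], out ++ [l]) := by
          simp [pvStep, pvStep0, hm']
        rw [List.foldl_cons, hstep, ih rest hrest (out ++ [l]),
          pvALoop_cons_not_marker l rest hm']
        simp

theorem pv_loops_eq (lines : List (List Char)) : pvBLoop lines = pvALoop lines := by
  have := pv_main_n lines.length lines (Nat.le_refl _) []
  simpa [pvBLoop] using this

-- ===== VERDICT (by name: the statement is the Claim_ definition above) =====
theorem strip_exiftool_headers_py_spec : Claim_equal_strip_exiftool_headers_py := by
  intro raw _
  unfold Spec_strip_exiftool_headers_py strip_exiftool_headers_py strip_exiftool_headers_py_alt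
  rw [pv_loops_eq]
  by_cases he : raw.toList.isEmpty = true
  · have h0 : raw.toList = [] := by simpa using he
    rw [h0]
    have h1 : pvSplitKeep ([] : List Char) = [] := rfl
    rw [if_pos (by simp), h1, pvALoop_nil]
    rfl
  · simp [he]
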